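-- pv_equiv track=rewrite | github.com/Samuel-BlankAmber/ctf-2024-public | Challenge Source/Secure Network Graphic/ssng.py | _apply_compression_filter
-- ===== SOURCE A (Python) =====
-- def _apply_compression_filter(chunk):
--     colours = list(zip(*chunk))
--     filtered_colours = []
--     for colour in colours:
--         filtered = [colour[0]]
--         for i, value in enumerate(colour[1:]):
--             filtered.append(value - colour[i])
--         filtered_colours.append(filtered)
--     return filtered_colours
-- ===== SOURCE B (Python) =====
-- def _apply_compression_filter(chunk):
--     if not chunk:
--         return []
--     width = min(len(row) for row in chunk)
--     out = [[chunk[0][c]] for c in range(width)]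
--     for prev, cur in zip(chunk, chunk[1:]):
--         for c in range(width):
--             out[c].append(cur[c] - prev[c])
--     return out
-- ===== Notes on version B (the rewrite author's own statement) =====
-- stated objective: alternative
-- what changed: B drops the explicit transpose: it derives the channel count from the minimum row length, seeds each channel list with the first row's value, and folds over consecutive row pairs appending per-channel differences, avoiding materialising zipped column tuples and indexing back into them with enumerate.
import Mathlib
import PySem

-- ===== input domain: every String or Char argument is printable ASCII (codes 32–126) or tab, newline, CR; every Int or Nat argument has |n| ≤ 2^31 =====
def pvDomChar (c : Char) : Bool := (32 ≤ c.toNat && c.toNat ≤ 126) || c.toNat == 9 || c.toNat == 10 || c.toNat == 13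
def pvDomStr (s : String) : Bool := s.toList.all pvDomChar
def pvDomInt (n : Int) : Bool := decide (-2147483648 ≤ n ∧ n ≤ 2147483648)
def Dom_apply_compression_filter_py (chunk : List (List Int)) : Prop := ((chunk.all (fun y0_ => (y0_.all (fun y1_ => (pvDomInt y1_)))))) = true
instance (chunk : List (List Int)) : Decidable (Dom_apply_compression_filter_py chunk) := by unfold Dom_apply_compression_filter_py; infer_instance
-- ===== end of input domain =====

-- B replaces A's transpose-then-delta with a no-transpose fold over consecutive row pairs (alternative decomposition, same cost).

-- ===== PORT A =====
-- zip(*chunk): columns of the chunk truncated to the shortest row; exact since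
-- each column index c satisfies c < every row's length, so getD's default is never used.
def apply_compression_filter_py (chunk : List (List Int)) : List (List Int) :=
  let colours : List (List Int) :=
    match (chunk.map List.length).min? with
    | none => []
    | some w => (List.range w).map (fun c => chunk.map (fun row => row.getD c 0))
  colours.map (fun colour =>
    match colour with
    | [] => []  -- unreachable: every column has chunk.length ≥ 1 entries
    | x :: rest => x :: (PySem.List.enumerate rest).map (fun p => p.2 - PySem.List.pyGetD colour p.1 0))

-- ===== PORT B =====
def apply_compression_filter_py_alt (chunk : List (List Int)) : List (List Int) :=
  match chunk with
  | [] => []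
  | r0 :: rest =>
    let width : Nat := (rest.map List.length).foldl min r0.length
    let init : List (List Int) := (List.range width).map (fun c => [r0.getD c 0])
    ((r0 :: rest).zip rest).foldl
      (fun out pr => (List.range width).map
        (fun c => out.getD c [] ++ [pr.2.getD c 0 - pr.1.getD c 0]))
      init

-- ===== PRECONDITION & SPEC =====
def Spec_apply_compression_filter_py (chunk : List (List Int)) (out : List (List Int)) : Prop := out = apply_compression_filter_py_alt chunk
instance (chunk : List (List Int)) (out : List (List Int)) : Decidable (Spec_apply_compression_filter_py chunk out) := by unfold Spec_apply_compression_filter_py; infer_instance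

-- ===== CLAIM (what is proved, stated in full; the proofs are below) =====
def Claim_equal_apply_compression_filter_py : Prop := ∀ (chunk : List (List Int)), Dom_apply_compression_filter_py chunk → Spec_apply_compression_filter_py chunk (apply_compression_filter_py chunk)

-- ===== LEMMAS AND PROOFS =====

-- A's inner enumerate loop over a column a :: t computes adjacent differences.
theorem enum_delta (a : Int) (t : List Int) :
    (PySem.List.enumerate t).map (fun p => p.2 - PySem.List.pyGetD (a :: t) p.1 0)
      = ((a :: t).zip t).map (fun p => p.2 - p.1) := by
  apply List.ext_getElem
  · simp
  · intro k h1 h2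
    simp only [List.getElem_map, PySem.List.getElem_enumerate, List.getElem_zip]
    have hk : k < t.length := by simpa using h1
    rw [zero_add, PySem.List.pyGetD_natCast]
    rw [List.getD_eq_getElem _ _ (by simp; omega)]

-- B's fold over consecutive row pairs, characterised in closed form.
theorem fold_step (w : Nat) (ps : List (List Int × List Int)) (g : Nat → List Int) :
    ps.foldl
      (fun out pr => (List.range w).map
        (fun c => out.getD c [] ++ [pr.2.getD c 0 - pr.1.getD c 0]))
      ((List.range w).map g)
      = (List.range w).map (fun c => g c ++ ps.map (fun pr => pr.2.getD c 0 - pr.1.getD c 0)) := by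
  induction ps generalizing g with
  | nil => simp
  | cons pr ps ih =>
    rw [List.foldl_cons]
    have h1 : (List.range w).map
        (fun c => ((List.range w).map g).getD c [] ++ [pr.2.getD c 0 - pr.1.getD c 0])
        = (List.range w).map (fun c => (fun c => g c ++ [pr.2.getD c 0 - pr.1.getD c 0]) c) := by
      apply List.map_congr_left
      intro c hc
      rw [List.getD_eq_getElem _ _ (by simpa using hc)]
      simp
    rw [h1, ih]
    apply List.map_congr_left
    intro c hc
    simp

-- ===== VERDICT (by name: the statement is the Claim_ definition above) =====
theorem apply_compression_filter_py_spec : Claim_equal_apply_compression_filter_py := by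
  unfold Claim_equal_apply_compression_filter_py
  intro chunk _
  unfold Spec_apply_compression_filter_py
  unfold apply_compression_filter_py apply_compression_filter_py_alt
  cases chunk with
  | nil => simp
  | cons r0 rest =>
    simp only
    have hmin : ((r0 :: rest).map List.length).min? = some ((rest.map List.length).foldl min r0.length) := by
      rw [List.map_cons, List.min?_cons']
    rw [hmin]
    set w := (rest.map List.length).foldl min r0.length with hw
    rw [fold_step]
    rw [List.map_map]
    apply List.map_congr_left
    intro c hc
    simp only [Function.comp_apply, List.map_cons]
    rw [enum_delta]
    rw [show (r0.getD c 0 :: rest.map (fun row => row.getD c 0)) = (r0 :: rest).map (fun row => row.getD c 0) by simp]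
    rw [List.zip_map]
    rw [List.map_map]
    simp
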